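-- pv_equiv track=rewrite | github.com/Sakura820251454/AutoTest-Rebuild | src/hardware_detector.py | _parse_wmic_output
-- ===== SOURCE A (Python) =====
-- from typing import Optional, List, Tuple
--
-- def _parse_wmic_output(output: str) -> List[str]:
--     """解析 wmic 输出"""
--     devices = []
--     current_device = {}
--
--     for line in output.strip().split('\n'):
--         line = line.strip()
--         if '=' in line:
--             key, value = line.split('=', 1)
--             current_device[key] = value
--         elif not line and current_device:
--             desc = current_device.get('Description', 'Unknown')
--             devices.append(desc)
--             current_device = {}
--
--     if current_device:
--         desc = current_device.get('Description', 'Unknown')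
--         devices.append(desc)
--
--     return devices
-- ===== SOURCE B (Python) =====
-- from typing import List
--
--
-- def _parse_wmic_output(output: str) -> List[str]:
--     """Parse wmic output: segment the stripped lines into blank-separated blocks,
--     then reduce each block to a dict of its key=value lines."""
--     lines = [l.strip() for l in output.strip().split('\n')]
--     blocks = []
--     cur = []
--     for line in lines:
--         if line:
--             cur.append(line)
--         else:
--             blocks.append(cur)
--             cur = []
--     blocks.append(cur)
--     devices = []
--     for block in blocks:
--         device = dict(l.split('=', 1) for l in block if '=' in l)
--         if device:
--             devices.append(device.get('Description', 'Unknown'))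
--     return devices
-- ===== Notes on version B (the rewrite author's own statement) =====
-- stated objective: alternative
-- what changed: A's single pass with an incremental dict flushed on blank lines and at the end is replaced by a two-phase segment-then-reduce: the stripped lines are first partitioned into blank-separated blocks, then each block is independently reduced to a dict of its key=value lines and contributes its Description (or 'Unknown') iff that dict is non-empty.
import Mathlib
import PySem

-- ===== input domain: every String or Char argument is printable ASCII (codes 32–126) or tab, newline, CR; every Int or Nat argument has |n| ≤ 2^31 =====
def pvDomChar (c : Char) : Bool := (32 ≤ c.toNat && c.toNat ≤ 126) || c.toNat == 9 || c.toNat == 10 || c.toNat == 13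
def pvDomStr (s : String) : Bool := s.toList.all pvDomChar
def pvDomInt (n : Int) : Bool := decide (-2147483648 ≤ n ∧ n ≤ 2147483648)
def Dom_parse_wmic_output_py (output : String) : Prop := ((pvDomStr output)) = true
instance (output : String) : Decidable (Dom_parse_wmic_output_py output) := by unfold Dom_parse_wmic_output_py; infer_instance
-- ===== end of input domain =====

-- B re-decomposes A's single-pass incremental flush as segment-into-blocks then reduce-each-block (objective: alternative decomposition, same cost).

-- ===== PORT A =====
-- literal transliteration of A: one pass over the lines, incremental dict with flush on blank line and at the end
def parse_wmic_output_py (output : String) : List String :=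
  let lines := (PySem.Str.split? (PySem.Str.strip output) "\n").getD []
  let st := lines.foldl
    (fun (st : List String × PySem.Dict String String) rawLine =>
      let line := PySem.Str.strip rawLine
      if PySem.Str.isIn "=" line then
        match PySem.Str.splitMax? line "=" 1 with
        | some (key :: value :: _) => (st.1, st.2.insert key value)
        | _ => st        -- unreachable: a line containing '=' splits into exactly two pieces
      else if line == "" && !st.2.items.isEmpty then
        (st.1 ++ [st.2.getD "Description" "Unknown"], PySem.Dict.empty)
      else st)
    ([], PySem.Dict.empty)
  if !st.2.items.isEmpty then st.1 ++ [st.2.getD "Description" "Unknown"] else st.1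

-- ===== PORT B =====
-- literal transliteration of B: strip all lines, segment into blank-separated blocks, reduce each block to a dict
def parse_wmic_output_py_alt (output : String) : List String :=
  let lines := ((PySem.Str.split? (PySem.Str.strip output) "\n").getD []).map PySem.Str.strip
  let seg := lines.foldl
    (fun (st : List (List String) × List String) line =>
      if line != "" then (st.1, st.2 ++ [line]) else (st.1 ++ [st.2], []))
    ([], [])
  let blocks := seg.1 ++ [seg.2]
  blocks.foldl
    (fun (devices : List String) block =>
      let device := (block.filter (fun l => PySem.Str.isIn "=" l)).foldl
        (fun (d : PySem.Dict String String) l =>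
          match (PySem.Str.splitMax? l "=" 1).getD [] with
          | [] => d
          | [_] => d
          | key :: value :: _ => d.insert key value) PySem.Dict.empty
      if !device.items.isEmpty then devices ++ [device.getD "Description" "Unknown"] else devices)
    []

-- ===== PRECONDITION & SPEC =====
def Spec_parse_wmic_output_py (output : String) (out : List String) : Prop := out = parse_wmic_output_py_alt output
instance (output : String) (out : List String) : Decidable (Spec_parse_wmic_output_py output out) := by unfold Spec_parse_wmic_output_py; infer_instance

-- ===== CLAIM (what is proved, stated in full; the proofs are below) =====
def Claim_equal_parse_wmic_output_py : Prop := ∀ (output : String), Dom_parse_wmic_output_py output → Spec_parse_wmic_output_py output (parse_wmic_output_py output)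

-- ===== LEMMAS AND PROOFS =====

-- A's loop body, on an already-stripped line
def pvStepA (st : List String × PySem.Dict String String) (line : String) :
    List String × PySem.Dict String String :=
  if PySem.Str.isIn "=" line then
    match PySem.Str.splitMax? line "=" 1 with
    | some (key :: value :: _) => (st.1, st.2.insert key value)
    | _ => st
  else if line == "" && !st.2.items.isEmpty then
    (st.1 ++ [st.2.getD "Description" "Unknown"], PySem.Dict.empty)
  else st

-- B's segmentation step
def pvStepSeg (st : List (List String) × List String) (line : String) :
    List (List String) × List String :=
  if line != "" then (st.1, st.2 ++ [line]) else (st.1 ++ [st.2], [])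

-- insert a line's key=value into a dict (no-op for lines without '=')
def pvIns (d : PySem.Dict String String) (l : String) : PySem.Dict String String :=
  if PySem.Str.isIn "=" l = true then
    match (PySem.Str.splitMax? l "=" 1).getD [] with
    | [] => d
    | [_] => d
    | key :: value :: _ => d.insert key value
  else d

def pvDictOf (d0 : PySem.Dict String String) (b : List String) : PySem.Dict String String :=
  b.foldl pvIns d0

def pvFlush (d : PySem.Dict String String) : List String :=
  if !d.items.isEmpty then [d.getD "Description" "Unknown"] else []

def pvFinish (st : List String × PySem.Dict String String) : List String :=
  if !st.2.items.isEmpty then st.1 ++ [st.2.getD "Description" "Unknown"] else st.1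

lemma pvFinish_eq (st : List String × PySem.Dict String String) :
    pvFinish st = st.1 ++ pvFlush st.2 := by
  by_cases h : st.2.items.isEmpty = true <;> simp [pvFinish, pvFlush, h]

-- what one fresh block reduces to
def pvBlockOut (b : List String) : List String := pvFlush (pvDictOf PySem.Dict.empty b)

-- blank-separated segmentation of the line list, with `cur` the open block
def pvSplitB (cur : List String) : List String → List (List String)
  | [] => [cur]
  | l :: ls => if l = "" then cur :: pvSplitB [] ls else pvSplitB (cur ++ [l]) ls

def pvProcFirst (d : PySem.Dict String String) : List (List String) → List String
  | [] => pvFlush d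
  | b :: bs => pvFlush (pvDictOf d b) ++ bs.flatMap pvBlockOut

lemma pvProcFirst_empty (bs : List (List String)) :
    pvProcFirst PySem.Dict.empty bs = bs.flatMap pvBlockOut := by
  cases bs with
  | nil => simp [pvProcFirst, pvFlush, PySem.Dict.empty]
  | cons b bs => simp [pvProcFirst, pvBlockOut]

lemma pv_isIn_nil : PySem.Chars.isIn ['='] ([] : List Char) = false := by decide

lemma pv_ne_empty_of_isIn {l : String} (h : PySem.Str.isIn "=" l = true) : ¬ (l = "") := by
  intro he; subst he; exact absurd h (by decide)

lemma pvDictOf_snoc (d0 : PySem.Dict String String) (cur : List String) (l : String) :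
    pvDictOf d0 (cur ++ [l]) = pvIns (pvDictOf d0 cur) l := by
  simp [pvDictOf, List.foldl_append]

lemma pv_main (ls : List String) : ∀ (cur : List String) (d0 : PySem.Dict String String)
    (devs : List String),
    pvFinish (ls.foldl pvStepA (devs, pvDictOf d0 cur)) = devs ++ pvProcFirst d0 (pvSplitB cur ls) := by
  induction ls with
  | nil =>
    intro cur d0 devs
    simp [pvSplitB, pvProcFirst, pvFinish_eq]
  | cons l ls ih =>
    intro cur d0 devs
    by_cases hE : PySem.Str.isIn "=" l = true
    · have hne : ¬ (l = "") := pv_ne_empty_of_isIn hE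
      have hsplit : pvSplitB cur (l :: ls) = pvSplitB (cur ++ [l]) ls := by
        simp [pvSplitB, hne]
      have hstep : pvStepA (devs, pvDictOf d0 cur) l = (devs, pvDictOf d0 (cur ++ [l])) := by
        rw [pvDictOf_snoc]
        simp only [pvStepA, pvIns, hE, if_pos]
        rcases hsp : PySem.Str.splitMax? l "=" 1 with _ | sl
        · rfl
        · rcases sl with _ | ⟨k, _ | ⟨v, rest⟩⟩ <;> rfl
      rw [hsplit, List.foldl_cons, hstep, ih]
    · have hE' : PySem.Str.isIn "=" l = false := by simpa using hE
      by_cases hB : l = ""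
      · subst hB
        have hs : pvSplitB cur ("" :: ls) = cur :: pvSplitB [] ls := by simp [pvSplitB]
        by_cases hD : (pvDictOf d0 cur).items.isEmpty = true
        · have hde : pvDictOf d0 cur = PySem.Dict.empty := by
            apply PySem.Dict.ext
            simpa [List.isEmpty_iff, PySem.Dict.empty] using hD
          have hflush : pvFlush (pvDictOf d0 cur) = [] := by simp [pvFlush, hD]
          have hstep : pvStepA (devs, pvDictOf d0 cur) "" = (devs, pvDictOf d0 cur) := by
            simp [pvStepA, pv_isIn_nil, hD]
          have h2 : pvDictOf d0 cur = pvDictOf (pvDictOf d0 cur) [] := rfl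
          rw [List.foldl_cons, hstep]
          conv_lhs => rw [h2]
          rw [ih, hs]
          rw [show pvProcFirst d0 (cur :: pvSplitB [] ls)
                = pvFlush (pvDictOf d0 cur) ++ (pvSplitB [] ls).flatMap pvBlockOut from rfl]
          rw [hflush, hde, pvProcFirst_empty]
          simp
        · have hstep : pvStepA (devs, pvDictOf d0 cur) ""
              = (devs ++ [(pvDictOf d0 cur).getD "Description" "Unknown"], PySem.Dict.empty) := by
            simp [pvStepA, pv_isIn_nil, hD]
          have h2 : (PySem.Dict.empty : PySem.Dict String String) = pvDictOf PySem.Dict.empty [] := rfl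
          rw [List.foldl_cons, hstep]
          conv_lhs => rw [h2]
          rw [ih, hs, pvProcFirst_empty]
          rw [show pvProcFirst d0 (cur :: pvSplitB [] ls)
                = pvFlush (pvDictOf d0 cur) ++ (pvSplitB [] ls).flatMap pvBlockOut from rfl]
          simp [pvFlush, hD]
      · have hsplit : pvSplitB cur (l :: ls) = pvSplitB (cur ++ [l]) ls := by
          simp [pvSplitB, hB]
        have hE2 : PySem.Chars.isIn ['='] l.toList = false := by simpa using hE
        have hstep : pvStepA (devs, pvDictOf d0 cur) l = (devs, pvDictOf d0 (cur ++ [l])) := by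
          rw [pvDictOf_snoc]
          simp [pvStepA, pvIns, hE2, hB]
        rw [hsplit, List.foldl_cons, hstep, ih]

lemma pv_seg_blocks (ls : List String) : ∀ (bs : List (List String)) (cur : List String),
    (ls.foldl pvStepSeg (bs, cur)).1 ++ [(ls.foldl pvStepSeg (bs, cur)).2]
      = bs ++ pvSplitB cur ls := by
  induction ls with
  | nil => intro bs cur; simp [pvSplitB]
  | cons l ls ih =>
    intro bs cur
    by_cases hB : l = ""
    · subst hB
      simp [List.foldl_cons, pvStepSeg, ih, pvSplitB]
    · have : pvStepSeg (bs, cur) l = (bs, cur ++ [l]) := by simp [pvStepSeg, hB]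
      rw [List.foldl_cons, this, ih]
      simp [pvSplitB, hB]

lemma pv_B_loop (blocks : List (List String)) : ∀ (devs : List String),
    blocks.foldl
      (fun (devices : List String) block =>
        let device := (block.filter (fun l => PySem.Str.isIn "=" l)).foldl
          (fun (d : PySem.Dict String String) l =>
            match (PySem.Str.splitMax? l "=" 1).getD [] with
            | [] => d
            | [_] => d
            | key :: value :: _ => d.insert key value) PySem.Dict.empty
        if !device.items.isEmpty then devices ++ [device.getD "Description" "Unknown"] else devices)
      devs
    = devs ++ blocks.flatMap pvBlockOut := by
  induction blocks with
  | nil => intro devs; simp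
  | cons b bs ih =>
    intro devs
    rw [List.foldl_cons, ih]
    have hdict : (b.filter (fun l => PySem.Str.isIn "=" l)).foldl
        (fun (d : PySem.Dict String String) l =>
          match (PySem.Str.splitMax? l "=" 1).getD [] with
          | [] => d
          | [_] => d
          | key :: value :: _ => d.insert key value) PySem.Dict.empty = pvDictOf PySem.Dict.empty b := by
      rw [List.foldl_filter]; rfl
    simp only [hdict, List.flatMap_cons, pvBlockOut, pvFlush]
    by_cases h : (pvDictOf PySem.Dict.empty b).items.isEmpty = true <;> simp [h]

lemma pv_A_general (L : List String) :
    (let st := L.foldl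
      (fun (st : List String × PySem.Dict String String) rawLine =>
        let line := PySem.Str.strip rawLine
        if PySem.Str.isIn "=" line then
          match PySem.Str.splitMax? line "=" 1 with
          | some (key :: value :: _) => (st.1, st.2.insert key value)
          | _ => st
        else if line == "" && !st.2.items.isEmpty then
          (st.1 ++ [st.2.getD "Description" "Unknown"], PySem.Dict.empty)
        else st)
      ([], PySem.Dict.empty)
     if !st.2.items.isEmpty then st.1 ++ [st.2.getD "Description" "Unknown"] else st.1)
    = (pvSplitB [] (L.map PySem.Str.strip)).flatMap pvBlockOut := by
  show pvFinish (L.foldl (fun st raw => pvStepA st (PySem.Str.strip raw)) ([], PySem.Dict.empty))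
    = (pvSplitB [] (L.map PySem.Str.strip)).flatMap pvBlockOut
  rw [← List.foldl_map (f := PySem.Str.strip) (g := pvStepA) (l := L)
    (init := (([], PySem.Dict.empty) : List String × PySem.Dict String String))]
  have h := pv_main (L.map PySem.Str.strip) [] PySem.Dict.empty []
  rw [pvProcFirst_empty] at h
  simp only [pvDictOf, List.foldl_nil, List.nil_append] at h
  exact h

lemma pv_portA_eq (output : String) :
    parse_wmic_output_py output
      = (pvSplitB [] (((PySem.Str.split? (PySem.Str.strip output) "\n").getD []).map PySem.Str.strip)).flatMap pvBlockOut := by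
  exact pv_A_general ((PySem.Str.split? (PySem.Str.strip output) "\n").getD [])

lemma pv_B_general (SL : List String) :
    (let seg := SL.foldl
      (fun (st : List (List String) × List String) line =>
        if line != "" then (st.1, st.2 ++ [line]) else (st.1 ++ [st.2], []))
      ([], [])
     let blocks := seg.1 ++ [seg.2]
     blocks.foldl
      (fun (devices : List String) block =>
        let device := (block.filter (fun l => PySem.Str.isIn "=" l)).foldl
          (fun (d : PySem.Dict String String) l =>
            match (PySem.Str.splitMax? l "=" 1).getD [] with
            | [] => d
            | [_] => d
            | key :: value :: _ => d.insert key value) PySem.Dict.empty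
        if !device.items.isEmpty then devices ++ [device.getD "Description" "Unknown"] else devices)
      [])
    = (pvSplitB [] SL).flatMap pvBlockOut := by
  show ((SL.foldl pvStepSeg ([], [])).1 ++ [(SL.foldl pvStepSeg ([], [])).2]).foldl
      (fun (devices : List String) block =>
        let device := (block.filter (fun l => PySem.Str.isIn "=" l)).foldl
          (fun (d : PySem.Dict String String) l =>
            match (PySem.Str.splitMax? l "=" 1).getD [] with
            | [] => d
            | [_] => d
            | key :: value :: _ => d.insert key value) PySem.Dict.empty
        if !device.items.isEmpty then devices ++ [device.getD "Description" "Unknown"] else devices)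
      []
    = (pvSplitB [] SL).flatMap pvBlockOut
  rw [pv_B_loop, pv_seg_blocks]
  simp

lemma pv_portB_eq (output : String) :
    parse_wmic_output_py_alt output
      = (pvSplitB [] (((PySem.Str.split? (PySem.Str.strip output) "\n").getD []).map PySem.Str.strip)).flatMap pvBlockOut := by
  exact pv_B_general (((PySem.Str.split? (PySem.Str.strip output) "\n").getD []).map PySem.Str.strip)

-- ===== VERDICT (by name: the statement is the Claim_ definition above) =====
theorem parse_wmic_output_py_spec : Claim_equal_parse_wmic_output_py := by
  intro output _
  unfold Spec_parse_wmic_output_py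
  rw [pv_portA_eq, pv_portB_eq]
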